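-- pv_equiv track=rewrite | github.com/Hojott/tira | vko3/sublists.py | count
-- ===== SOURCE A (Python) =====
-- def count(t):
--     count = 0
--     sums = [0]
--     prevs = dict()
--
--     for i, value in enumerate(t):
--         if not sums:
--             sums.append(value)
--         else:
--             sums.append(sums[-1] + value)
--
--         if value not in prevs:
--             prevs[value] = dict()
--         if sums[-2] not in prevs[value]:
--             prevs[value][sums[-2]] = 0
--         prevs[value][sums[-2]] += 1
--
--         if sums[-1] in prevs[value]:
--             count += prevs[value][sums[-1]]
--
--     return count
-- ===== SOURCE B (Python) =====
-- def count(t):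
--     # Two staged passes: build the prefix-sum list once, then count matching
--     # index pairs (j, i) with a plain quadratic double scan comparing prefix
--     # sums for equality. No dictionaries, no per-step bookkeeping.
--     n = len(t)
--     prefix = [0]
--     for x in t:
--         prefix.append(prefix[-1] + x)
--     c = 0
--     for i in range(n):
--         for j in range(i + 1):
--             if t[j] == t[i] and prefix[i + 1] == prefix[j]:
--                 c += 1
--     return c
-- ===== Notes on version B (the rewrite author's own statement) =====
-- stated objective: simpler
-- what changed: Replaces A's single pass with a value-keyed dict-of-dicts of running counts by two staged passes: build the prefix-sum list once, then count index pairs (j <= i) with t[j] == t[i] and prefix[i+1] == prefix[j] by a plain quadratic double scan; no dictionaries and no per-step bookkeeping.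
import Mathlib
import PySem

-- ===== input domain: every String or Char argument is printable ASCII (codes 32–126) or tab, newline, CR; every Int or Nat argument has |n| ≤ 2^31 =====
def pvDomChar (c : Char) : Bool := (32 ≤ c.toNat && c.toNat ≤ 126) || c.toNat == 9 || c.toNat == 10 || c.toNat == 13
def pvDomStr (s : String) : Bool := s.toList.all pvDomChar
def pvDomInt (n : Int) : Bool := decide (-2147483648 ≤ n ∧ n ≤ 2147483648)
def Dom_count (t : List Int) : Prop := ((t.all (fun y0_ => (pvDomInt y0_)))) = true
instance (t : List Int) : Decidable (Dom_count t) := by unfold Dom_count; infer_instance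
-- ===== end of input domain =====

-- B replaces A's one-pass value-keyed dict-of-dicts with two staged passes: build the
-- prefix-sum list once, then count index pairs (j ≤ i) with t[j] = t[i] and
-- prefix[i+1] = prefix[j] by a plain quadratic double scan: simpler, not faster.

-- ===== PORT A =====
-- one iteration of A's `for i, value in enumerate(t)` loop (the index i is unused, so the
-- fold runs over the values); state = (count, sums, prevs)
def countStep (st : Int × List Int × PySem.Dict Int (PySem.Dict Int Int)) (value : Int) :
    Int × List Int × PySem.Dict Int (PySem.Dict Int Int) :=
  let cnt := st.1
  let sums := st.2.1
  let prevs := st.2.2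
  -- if not sums: sums.append(value) else: sums.append(sums[-1] + value)
  let sums := if sums = [] then sums ++ [value] else sums ++ [sums.getLastD 0 + value]
  -- sums[-2]: always in range here (sums has ≥ 2 elements), so the getD default is never used
  let s2 := (PySem.List.pyGet? sums (-2)).getD 0
  -- if value not in prevs: prevs[value] = dict()
  let prevs := if prevs.contains value then prevs else prevs.insert value PySem.Dict.empty
  let d := prevs.getD value PySem.Dict.empty            -- prevs[value]
  -- if sums[-2] not in prevs[value]: prevs[value][sums[-2]] = 0
  let d := if d.contains s2 then d else d.insert s2 0
  -- prevs[value][sums[-2]] += 1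
  let d := d.insert s2 (d.getD s2 0 + 1)
  let prevs := prevs.insert value d                     -- write-back of the in-place mutation
  -- sums[-1]: sums is nonempty, so getLastD's default is never used
  let s1 := sums.getLastD 0
  -- if sums[-1] in prevs[value]: count += prevs[value][sums[-1]]
  let cnt := if d.contains s1 then cnt + d.getD s1 0 else cnt
  (cnt, sums, prevs)

def count (t : List Int) : Int :=
  (t.foldl countStep (0, [0], PySem.Dict.empty)).1

-- ===== PORT B =====
-- B's first pass: `prefix = [0]; for x in t: prefix.append(prefix[-1] + x)`
-- (prefix is never empty, so pyGetD's default is never used)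
def prefixFold (t : List Int) : List Int :=
  t.foldl (fun acc x => acc ++ [PySem.List.pyGetD acc (-1) 0 + x]) [0]

-- B's second pass: the quadratic double scan over index pairs (all indices in range,
-- so pyGetD's defaults are never used)
def count_alt (t : List Int) : Int :=
  let pre := prefixFold t
  (PySem.List.pyRange 0 (PySem.List.len t) 1).foldl (fun c i =>
    (PySem.List.pyRange 0 (i + 1) 1).foldl (fun c j =>
      if PySem.List.pyGetD t j 0 = PySem.List.pyGetD t i 0 ∧
         PySem.List.pyGetD pre (i + 1) 0 = PySem.List.pyGetD pre j 0
      then c + 1 else c) c) 0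

-- ===== PRECONDITION & SPEC =====
def Spec_count (t : List Int) (out : Int) : Prop := out = count_alt t
instance (t : List Int) (out : Int) : Decidable (Spec_count t out) := by unfold Spec_count; infer_instance

-- ===== CLAIM (what is proved, stated in full; the proofs are below) =====
def Claim_equal_count : Prop := ∀ (t : List Int), Dom_count t → Spec_count t (count t)

-- ===== LEMMAS AND PROOFS =====

-- proof-local auxiliary fold: a single pass carrying the list `seen` of
-- (value, prefix-sum-before) pairs; the bridge between A's dict pass and B's index scan
def auxStep (st : Int × List (Int × Int) × Int) (x : Int) :
    Int × List (Int × Int) × Int :=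
  let seen := st.2.1 ++ [(x, st.2.2)]
  let s := st.2.2 + x
  (st.1 + (seen.countP (fun p => p.1 == x && p.2 == s) : Int), seen, s)

lemma dict_getD_of_not_contains {κ ν : Type} [BEq κ] [LawfulBEq κ]
    (d : PySem.Dict κ ν) (k : κ) (v0 : ν)
    (h : d.contains k = false) : d.getD k v0 = v0 := by
  simp [PySem.Dict.contains, PySem.Dict.getD, PySem.Dict.get?] at *
  rw [List.find?_eq_none.mpr] <;> simp_all <;> exact h

lemma pyGet?_concat_neg_two (xs : List Int) (y : Int) (h : xs ≠ []) :
    PySem.List.pyGet? (xs ++ [y]) (-2) = some (xs.getLastD 0) := by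
  have hl : 1 ≤ xs.length := by cases xs <;> simp_all
  simp [PySem.List.pyGet?, PySem.List.pyIdx?, hl]
  rw [List.getElem_append_left (by omega), List.getLast?_eq_getElem?]
  simp [List.getElem?_eq_getElem (show xs.length - 1 < xs.length by omega)]

-- countP of `seen` matched against (v, q), as an Int
def seenCnt (seen : List (Int × Int)) (v q : Int) : Int :=
  (seen.countP (fun p => p.1 == v && p.2 == q) : Int)

lemma seenCnt_append (seen : List (Int × Int)) (x s v q : Int) :
    seenCnt (seen ++ [(x, s)]) v q =
      seenCnt seen v q + (if v = x ∧ q = s then 1 else 0) := by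
  simp [seenCnt, List.countP_append, List.countP_cons]
  split_ifs with h <;> simp_all [eq_comm]

lemma seenCnt_eq_zero_of_not_any (seen : List (Int × Int)) (v q : Int)
    (h : seen.any (fun p => p.1 == v && p.2 == q) = false) :
    seenCnt seen v q = 0 := by
  simp [seenCnt, List.countP_eq_zero]
  intro a b hab
  simp [List.any_eq_false] at h
  exact fun hv => (h a b hab hv)

-- A's fold equals the auxiliary seen-list fold (invariant-carrying loop equivalence)
lemma loop_eq (t : List Int) :
    ∀ (c : Int) (sums : List Int) (prevs : PySem.Dict Int (PySem.Dict Int Int))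
      (seen : List (Int × Int)) (s : Int),
      sums ≠ [] → sums.getLastD 0 = s →
      (∀ v q, (prevs.getD v PySem.Dict.empty).getD q 0 = seenCnt seen v q) →
      (∀ v q, (prevs.getD v PySem.Dict.empty).contains q
                = seen.any (fun p => p.1 == v && p.2 == q)) →
      (t.foldl countStep (c, sums, prevs)).1
        = (t.foldl auxStep (c, seen, s)).1 := by
  induction t with
  | nil => intro c sums prevs seen s _ _ _ _; rfl
  | cons x r ih =>
    intro c sums prevs seen s hne hlast hcnt hcon
    have hget : (PySem.List.pyGet? (sums ++ [s + x]) (-2)).getD 0 = s := by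
      rw [pyGet?_concat_neg_two sums _ hne, hlast]; rfl
    set prevs1 : PySem.Dict Int (PySem.Dict Int Int) :=
      if prevs.contains x then prevs else prevs.insert x PySem.Dict.empty with hprevs1
    have houter : ∀ v, prevs1.getD v PySem.Dict.empty = prevs.getD v PySem.Dict.empty := by
      intro v
      rw [hprevs1]
      split_ifs with h
      · rfl
      · rw [PySem.Dict.getD_insert]
        split_ifs with hv
        · subst hv
          rw [dict_getD_of_not_contains _ _ _ (by simpa using h)]
        · rfl
    set d0 := prevs.getD x PySem.Dict.empty with hd0
    set d1 : PySem.Dict Int Int := if d0.contains s then d0 else d0.insert s 0 with hd1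
    have hd1getD : ∀ q, d1.getD q 0 = d0.getD q 0 := by
      intro q
      rw [hd1]; split_ifs with h
      · rfl
      · rw [PySem.Dict.getD_insert]
        split_ifs with hq
        · subst hq; rw [dict_getD_of_not_contains _ _ _ (by simpa using h)]
        · rfl
    have hd1con : ∀ q, d1.contains q = ((q == s) || d0.contains q) := by
      intro q
      rw [hd1]; split_ifs with h
      · by_cases hq : q = s
        · subst hq; simp [h]
        · simp [hq]
      · rw [PySem.Dict.contains_insert]
    set d2 : PySem.Dict Int Int := d1.insert s (d1.getD s 0 + 1) with hd2
    have hd2getD : ∀ q, d2.getD q 0 = seenCnt (seen ++ [(x, s)]) x q := by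
      intro q
      rw [hd2, PySem.Dict.getD_insert, seenCnt_append]
      simp only [hd1getD, hd0, hcnt]
      by_cases hq : q = s
      · subst hq; simp
      · simp [hq]
    have hd2con : ∀ q, d2.contains q
        = (seen ++ [(x, s)]).any (fun p => p.1 == x && p.2 == q) := by
      intro q
      rw [hd2, PySem.Dict.contains_insert]
      simp only [hd1con, hd0, hcon]
      by_cases hq : q = s
      · simp [hq, Bool.or_comm]
      · have h1 : (q == s) = false := by simp [hq]
        have h2 : (s == q) = false := by simp [Ne.symm hq]
        simp [h1, h2]
    have hstepA : countStep (c, sums, prevs) x =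
        ((if d2.contains (s + x) then c + d2.getD (s + x) 0 else c),
          sums ++ [s + x], prevs1.insert x d2) := by
      simp only [countStep]
      rw [if_neg hne, hlast, hget, List.getLastD_concat]
      rw [← hprevs1, houter x, ← hd0, ← hd1, ← hd2]
    have hstepB : auxStep (c, seen, s) x =
        (c + seenCnt (seen ++ [(x, s)]) x (s + x), seen ++ [(x, s)], s + x) := by
      simp [auxStep, seenCnt]
    have hincr : (if d2.contains (s + x) then c + d2.getD (s + x) 0 else c)
        = c + seenCnt (seen ++ [(x, s)]) x (s + x) := by
      split_ifs with h
      · rw [hd2getD]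
      · simp only [Bool.not_eq_true] at h
        rw [seenCnt_eq_zero_of_not_any _ _ _ (by rw [← hd2con]; exact h)]
        ring
    have hc' : ∀ v q, ((prevs1.insert x d2).getD v PySem.Dict.empty).getD q 0
        = seenCnt (seen ++ [(x, s)]) v q := by
      intro v q
      rw [PySem.Dict.getD_insert]
      split_ifs with hv
      · subst hv; exact hd2getD q
      · rw [houter, hcnt, seenCnt_append]
        simp [hv]
    have hco' : ∀ v q, ((prevs1.insert x d2).getD v PySem.Dict.empty).contains q
        = (seen ++ [(x, s)]).any (fun p => p.1 == v && p.2 == q) := by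
      intro v q
      rw [PySem.Dict.getD_insert]
      split_ifs with hv
      · subst hv; exact hd2con q
      · rw [houter, hcon]
        simp only [List.any_append, List.any_cons, List.any_nil]
        by_cases hx : x = v
        · subst hx; exact absurd rfl hv
        · simp [hx]
    calc (List.foldl countStep (countStep (c, sums, prevs) x) r).1
        = (List.foldl countStep
            ((if d2.contains (s + x) then c + d2.getD (s + x) 0 else c),
              sums ++ [s + x], prevs1.insert x d2) r).1 := by rw [hstepA]
      _ = (List.foldl auxStep
            (c + seenCnt (seen ++ [(x, s)]) x (s + x), seen ++ [(x, s)], s + x) r).1 := by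
            rw [hincr]
            exact ih _ _ _ _ _ (by simp) (by simp) hc' hco'
      _ = (List.foldl auxStep (auxStep (c, seen, s) x) r).1 := by rw [hstepB]

-- ---- closed forms for the prefix list and the seen list ----

def prefOf (t : List Int) : List Int :=
  (List.range (t.length + 1)).map (fun j => (t.take j).sum)

def pairsOf (t : List Int) : List (Int × Int) :=
  (List.range t.length).map (fun j => (t.getD j 0, (t.take j).sum))

lemma prefOf_get (t : List Int) (j : Nat) (h : j ≤ t.length) :
    PySem.List.pyGetD (prefOf t) (j : Int) 0 = (t.take j).sum := by
  rw [PySem.List.pyGetD_natCast]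
  simp [prefOf, List.getD, List.getElem?_map, List.getElem?_range (by omega : j < t.length + 1)]

lemma prefOf_append (t : List Int) (x : Int) :
    prefOf (t ++ [x]) = prefOf t ++ [t.sum + x] := by
  simp only [prefOf, List.length_append, List.length_singleton]
  rw [show t.length + 1 + 1 = (t.length + 1) + 1 from rfl, List.range_succ, List.map_append]
  congr 1
  · apply List.map_congr_left
    intro j hj
    simp only [List.mem_range] at hj
    rw [List.take_append_of_le_length (by omega)]
  · simp only [List.map_cons, List.map_nil]
    rw [List.take_of_length_le (by simp)]
    simp

lemma prefixFold_eq (t : List Int) : prefixFold t = prefOf t := by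
  induction t using List.reverseRecOn with
  | nil => simp [prefixFold, prefOf]
  | append_singleton r x ih =>
    rw [prefixFold, List.foldl_append]
    rw [show r.foldl (fun acc x => acc ++ [PySem.List.pyGetD acc (-1) 0 + x]) [0] = prefixFold r from rfl, ih]
    simp only [List.foldl_cons, List.foldl_nil]
    rw [prefOf_append]
    congr 2
    rw [PySem.List.pyGetD_neg_one (prefOf r) 0 (by simp [prefOf])]
    rw [List.getLast_eq_getElem]
    simp [prefOf]

lemma pairsOf_append (t : List Int) (x : Int) :
    pairsOf (t ++ [x]) = pairsOf t ++ [(x, t.sum)] := by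
  simp only [pairsOf, List.length_append, List.length_singleton]
  rw [List.range_succ, List.map_append]
  congr 1
  · apply List.map_congr_left
    intro j hj
    simp only [List.mem_range] at hj
    rw [List.take_append_of_le_length (by omega)]
    congr 1
    simp [List.getD, List.getElem?_append_left hj]
  · simp only [List.map_cons, List.map_nil]
    rw [List.take_append_of_le_length (le_refl t.length), List.take_length]
    simp [List.getD]

-- the auxiliary fold's state is (count, pairsOf t, t.sum)
lemma aux_state (t : List Int) :
    (t.foldl auxStep (0, ([] : List (Int × Int)), 0)).2.1 = pairsOf t ∧
    (t.foldl auxStep (0, ([] : List (Int × Int)), 0)).2.2 = t.sum := by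
  induction t using List.reverseRecOn with
  | nil => simp [pairsOf]
  | append_singleton r x ih =>
    rw [List.foldl_append]
    simp only [List.foldl_cons, List.foldl_nil]
    constructor
    · show (r.foldl auxStep (0, [], 0)).2.1 ++ [(x, (r.foldl auxStep (0, [], 0)).2.2)] = _
      rw [ih.1, ih.2, pairsOf_append]
    · show (r.foldl auxStep (0, [], 0)).2.2 + x = _
      rw [ih.2]; simp

-- in-range pyGetD ignores a trailing append
lemma pyGetD_append_left (l l2 : List Int) (i : Int) (d : Int)
    (h0 : 0 ≤ i) (h : i < l.length) :
    PySem.List.pyGetD (l ++ l2) i d = PySem.List.pyGetD l i d := by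
  obtain ⟨k, rfl⟩ : ∃ k : Nat, i = (k : Int) := ⟨i.toNat, (Int.toNat_of_nonneg h0).symm⟩
  have hk : k < l.length := by exact_mod_cast h
  rw [PySem.List.pyGetD_natCast, PySem.List.pyGetD_natCast]
  simp [List.getD, List.getElem?_append_left hk]

-- B's scan over r ++ [x]: the first r.length outer iterations compute count_alt r,
-- the last one adds the number of matching pairs ending at the new element
lemma count_alt_append (r : List Int) (x : Int) :
    count_alt (r ++ [x]) = count_alt r + seenCnt (pairsOf (r ++ [x])) x (r.sum + x) := by
  simp only [count_alt, prefixFold_eq, PySem.List.len_eq, List.length_append,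
    List.length_singleton]
  rw [show ((r.length + 1 : Nat) : Int) = (r.length : Int) + 1 by push_cast; ring,
      PySem.List.pyRange_one_succ_right (by positivity), List.foldl_append]
  have hcong :
      (PySem.List.pyRange 0 (r.length : Int) 1).foldl (fun (c : Int) i =>
          (PySem.List.pyRange 0 (i + 1) 1).foldl (fun c j =>
            if PySem.List.pyGetD (r ++ [x]) j 0 = PySem.List.pyGetD (r ++ [x]) i 0 ∧
               PySem.List.pyGetD (prefOf (r ++ [x])) (i + 1) 0
                 = PySem.List.pyGetD (prefOf (r ++ [x])) j 0
            then c + 1 else c) c) 0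
        = (PySem.List.pyRange 0 (r.length : Int) 1).foldl (fun (c : Int) i =>
          (PySem.List.pyRange 0 (i + 1) 1).foldl (fun c j =>
            if PySem.List.pyGetD r j 0 = PySem.List.pyGetD r i 0 ∧
               PySem.List.pyGetD (prefOf r) (i + 1) 0 = PySem.List.pyGetD (prefOf r) j 0
            then c + 1 else c) c) 0 := by
    apply PySem.List.foldl_congr_mem
    intro acc i hi
    rw [PySem.List.mem_pyRange_one] at hi
    apply PySem.List.foldl_congr_mem
    intro acc2 j hj
    rw [PySem.List.mem_pyRange_one] at hj
    have hiN : i < (r.length : Int) := hi.2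
    have hjN : j < (r.length : Int) := by omega
    rw [prefOf_append,
        pyGetD_append_left r [x] j 0 hj.1 (by exact_mod_cast hjN),
        pyGetD_append_left r [x] i 0 hi.1 (by exact_mod_cast hiN),
        pyGetD_append_left (prefOf r) [r.sum + x] (i + 1) 0 (by omega)
          (by simp [prefOf]; omega),
        pyGetD_append_left (prefOf r) [r.sum + x] j 0 hj.1
          (by simp [prefOf]; omega)]
  rw [hcong]
  simp only [List.foldl_cons, List.foldl_nil]
  rw [PySem.List.foldl_ite_add_one]
  congr 1
  -- the final inner scan counts exactly the matching (value, prefix-sum) pairs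
  unfold seenCnt
  rw [show pairsOf (r ++ [x])
        = (List.range (r.length + 1)).map
            (fun j => ((r ++ [x]).getD j 0, ((r ++ [x]).take j).sum)) by
      simp [pairsOf]]
  rw [PySem.List.pyRange_one, show ((r.length : Int) + 1 - 0).toNat = r.length + 1 by omega]
  rw [List.countP_map, List.countP_map]
  congr 1
  apply List.countP_congr
  intro k hk
  rw [List.mem_range] at hk
  have h1 : PySem.List.pyGetD (r ++ [x]) (0 + (k : Int)) 0 = (r ++ [x]).getD k 0 := by
    rw [zero_add, PySem.List.pyGetD_natCast]
  have h2 : PySem.List.pyGetD (r ++ [x]) (r.length : Int) 0 = x := by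
    rw [PySem.List.pyGetD_natCast]
    simp [List.getD]
  have h3 : PySem.List.pyGetD (prefOf (r ++ [x])) ((r.length : Int) + 1) 0 = r.sum + x := by
    rw [show ((r.length : Int) + 1) = ((r.length + 1 : Nat) : Int) by push_cast; ring,
        prefOf_get (r ++ [x]) (r.length + 1) (by simp)]
    rw [List.take_of_length_le (by simp)]
    simp
  have h4 : PySem.List.pyGetD (prefOf (r ++ [x])) (0 + (k : Int)) 0
      = ((r ++ [x]).take k).sum := by
    rw [zero_add, prefOf_get (r ++ [x]) k (by simp; omega)]
  simp only [Function.comp_apply, h1, h2, h3, h4]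
  rw [decide_eq_true_iff, Bool.and_eq_true, beq_iff_eq, beq_iff_eq]
  constructor
  · rintro ⟨u, v⟩; exact ⟨u, v.symm⟩
  · rintro ⟨u, v⟩; exact ⟨u, v.symm⟩

-- the auxiliary fold's count equals B's two-pass scan
lemma aux_eq_alt (t : List Int) :
    (t.foldl auxStep (0, ([] : List (Int × Int)), 0)).1 = count_alt t := by
  induction t using List.reverseRecOn with
  | nil => rfl
  | append_singleton r x ih =>
    rw [List.foldl_append]
    simp only [List.foldl_cons, List.foldl_nil]
    show (r.foldl auxStep (0, [], 0)).1 +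
        (((r.foldl auxStep (0, [], 0)).2.1 ++ [(x, (r.foldl auxStep (0, [], 0)).2.2)]).countP
          (fun p => p.1 == x && p.2 == ((r.foldl auxStep (0, [], 0)).2.2 + x)) : Int) = _
    rw [(aux_state r).1, (aux_state r).2, ih, count_alt_append, ← pairsOf_append]
    rfl

-- ===== VERDICT (by name: the statement is the Claim_ definition above) =====
theorem count_spec : Claim_equal_count := by
  intro t _
  unfold Spec_count count
  rw [loop_eq t 0 [0] PySem.Dict.empty [] 0 (by simp) (by simp)
    (fun v q => by simp [PySem.Dict.getD, PySem.Dict.get?, PySem.Dict.empty, seenCnt])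
    (fun v q => by simp [PySem.Dict.getD, PySem.Dict.get?, PySem.Dict.empty, PySem.Dict.contains])]
  exact aux_eq_alt t
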